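-- pv_equiv track=rewrite | github.com/tsuttaket2/RLR | SGH/prepare_static_data.py | create_out_header
-- ===== SOURCE A (Python) =====
-- import argparse, os, time, json, math, gzip
--
-- class StatsInfo:
--     def __init__(self):
--         self._total  = 0.0 #sum of X
--         self._total2 = 0.0 #sum of X^2
--         self._count = 0
--         self._min =  math.inf
--         self._max = -math.inf
--
--     def add_new_value(self, v):
--         #if type(v) != float: pprint(f"bad: {v}")
--         self._total  += v
--         self._total2 += v*v
--         self._count  += 1
--         if v < self._min: self._min = v
--         if v > self._max: self._max = v
--
--     def mean(self):
--         if self._count == 0: return 0.0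
--         return self._total / self._count
--     def std(self):
--         if self._count == 0: return 0.0
--         return math.sqrt(self._total2 / self._count - self.mean()**2)
--     def min(self):
--         if self._count == 0: return 0.0
--         return self._min
--     def max(self):
--         if self._count == 0: return 0.0
--         return self._max
--     def get_stats(self): return [self.mean(), self.std(), self.min(), self.max()]
--
--     @staticmethod
--     def get_feature_names(feature_name):
--         return [feature_name+"_MEAN", feature_name+"_STD", feature_name+"_MIN", feature_name+"_MAX"]
--
--     @staticmethod
--     def get_number_stats(): return 4
--
-- def compute_length_and_begin_end_pos_helper(id_to_feature, is_categorical_feature, possible_values,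
--                                             num_cells_for_non_categorical):
--     num_features = len(id_to_feature)
--     cur_len = 0
--     begin_pos = [0] * num_features
--     end_pos   = [0] * num_features
--     for i in range(num_features):
--         feature = id_to_feature[i]
--         begin_pos[i] = cur_len
--         if is_categorical_feature[feature]:
--             end_pos[i] = begin_pos[i] + len(possible_values[feature])
--         else:
--             end_pos[i] = begin_pos[i] + num_cells_for_non_categorical
--         cur_len = end_pos[i]
--     return cur_len, begin_pos, end_pos
--
-- def compute_length_and_begin_end_pos_with_stats(id_to_feature, is_categorical_feature, possible_values):
--     return compute_length_and_begin_end_pos_helper(id_to_feature, is_categorical_feature, possible_values,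
--                                                    StatsInfo.get_number_stats())
--
-- def create_out_header(id_to_feature, is_categorical_feature, possible_values):
--     length, begin_pos, end_pos = compute_length_and_begin_end_pos_with_stats(id_to_feature, is_categorical_feature,
--                                                                              possible_values)
--     assert len(begin_pos) == len(end_pos) == len(id_to_feature)
--
--     ##debug
--     # num_items = 0
--     # for i in range(len(id_to_feature)):
--     #     feature = id_to_feature[i]
--     #     if is_categorical_feature[feature]: num_items += len(possible_values[feature])
--     #     else:                               num_items += 4
--     # assert num_items == length
--
--     out_header = [''] * (length + 1)  # +1 is for y label, len(out_header) == 57265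
--
--     for i in range(len(id_to_feature)):
--         feature = id_to_feature[i]
--         sidx = begin_pos[i]
--         eidx = end_pos[i]
--         if is_categorical_feature[feature]:
--             assert eidx-sidx == len(possible_values[feature])
--             for value, idx in possible_values[feature].items():
--                 feature_name = feature+"_"+value
--                 if ',' in feature_name:
--                     feature_name = f'"{feature_name}"'
--                 out_header[sidx+idx] = feature_name
--         else:
--             assert eidx-sidx == StatsInfo.get_number_stats()
--             feature_names = StatsInfo.get_feature_names(feature)
--             assert len(feature_names) == StatsInfo.get_number_stats()
--             for j in range(len(feature_names)):
--                 out_header[sidx+j] = feature_names[j]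
--
--     #for i in range(len(out_header)-100,len(out_header)): pprint(f'{i}: {out_header[i]}') #debug
--     out_header[-1] = "Y_LABEL"
--     #for i in range(len(out_header)-100,len(out_header)): pprint(f'{i}: {out_header[i]}') #debug
--     return out_header
-- ===== SOURCE B (Python) =====
-- def create_out_header(id_to_feature, is_categorical_feature, possible_values):
--     out = []
--     for i in range(len(id_to_feature)):
--         feature = id_to_feature[i]
--         if is_categorical_feature[feature]:
--             pv = possible_values[feature]
--             block = [''] * len(pv)
--             for value, idx in pv.items():
--                 feature_name = feature + "_" + value
--                 if ',' in feature_name: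
--                     feature_name = f'"{feature_name}"'
--                 block[idx] = feature_name
--             out.extend(block)
--         else:
--             out.extend([feature + "_MEAN", feature + "_STD",
--                         feature + "_MIN", feature + "_MAX"])
--     out.append("Y_LABEL")
--     return out
-- ===== Notes on version B (the rewrite author's own statement) =====
-- stated objective: simpler
-- what changed: B drops A's begin/end position arrays and preallocated flat output with global scatter-writes, and instead builds the header in one incremental pass, appending each feature's block (a local ''-initialised slice scattered by value index for categorical features, the four stat names otherwise) and finally 'Y_LABEL'.
import Mathlib
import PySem

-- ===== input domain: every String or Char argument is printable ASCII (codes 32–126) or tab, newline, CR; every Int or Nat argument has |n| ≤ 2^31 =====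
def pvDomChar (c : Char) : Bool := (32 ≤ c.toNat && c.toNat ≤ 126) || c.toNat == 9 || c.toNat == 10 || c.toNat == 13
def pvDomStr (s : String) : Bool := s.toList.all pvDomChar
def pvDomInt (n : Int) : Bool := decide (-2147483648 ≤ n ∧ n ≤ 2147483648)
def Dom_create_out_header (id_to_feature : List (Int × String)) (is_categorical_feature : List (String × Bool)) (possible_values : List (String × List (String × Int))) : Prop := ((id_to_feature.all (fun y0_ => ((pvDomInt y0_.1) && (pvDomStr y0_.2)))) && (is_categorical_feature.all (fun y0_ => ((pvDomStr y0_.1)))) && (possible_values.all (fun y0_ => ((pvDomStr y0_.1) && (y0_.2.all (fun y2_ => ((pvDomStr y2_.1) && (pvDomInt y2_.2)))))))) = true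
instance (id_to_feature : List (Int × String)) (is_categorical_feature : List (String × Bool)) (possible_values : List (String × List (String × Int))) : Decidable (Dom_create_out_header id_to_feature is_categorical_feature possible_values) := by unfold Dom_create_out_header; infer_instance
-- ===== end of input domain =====

-- B builds the header in one incremental pass (per-feature blocks appended in order) instead of
-- A's precomputed begin/end position arrays plus scatter-writes into a preallocated flat array;
-- objective: simpler. Return-value equivalence only (neither mutates its arguments).

-- shared name-building helpers (identical text in both Pythons)
-- Python str + str, exact
def pyStrAdd (a b : String) : String := String.ofList (a.toList ++ b.toList)

def pvFeatureName (feature value : String) : String :=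
  let nm := pyStrAdd (pyStrAdd feature "_") value
  if PySem.Str.isIn "," nm then pyStrAdd (pyStrAdd "\"" nm) "\"" else nm

-- StatsInfo.get_feature_names
def pvStatNames (f : String) : List String :=
  [pyStrAdd f "_MEAN", pyStrAdd f "_STD", pyStrAdd f "_MIN", pyStrAdd f "_MAX"]

-- ===== PORT A =====
-- compute_length_and_begin_end_pos_helper (ep computed as in A; only used by A's asserts)
def pvComputeHelper (dId : PySem.Dict Int String) (dCat : PySem.Dict String Bool)
    (dPv : PySem.Dict String (List (String × Int))) (numCells : Nat) :
    Nat × List Nat × List Nat :=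
  let n := dId.size
  (List.range n).foldl (fun st (i : Nat) =>
    let feature := dId.getD (i : Int) ""
    let bp := st.2.1.set i st.1
    let e := if dCat.getD feature false then st.1 + (dPv.getD feature []).length
             else st.1 + numCells
    let ep := st.2.2.set i e
    (e, bp, ep)) (0, List.replicate n 0, List.replicate n 0)

def create_out_header (id_to_feature : List (Int × String)) (is_categorical_feature : List (String × Bool)) (possible_values : List (String × List (String × Int))) : List String :=
  let dId := PySem.Dict.mk id_to_feature
  let dCat := PySem.Dict.mk is_categorical_feature
  let dPv := PySem.Dict.mk possible_values
  let r := pvComputeHelper dId dCat dPv 4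
  let len := r.1
  let bp := r.2.1
  let out0 := List.replicate (len + 1) ""
  let out := (List.range dId.size).foldl (fun out (i : Nat) =>
    let feature := dId.getD (i : Int) ""
    let sidx := bp.getD i 0
    if dCat.getD feature false then
      (dPv.getD feature []).foldl
        (fun out p => PySem.List.pySetD out ((sidx : Int) + p.2) (pvFeatureName feature p.1)) out
    else
      (List.range 4).foldl
        (fun out (j : Nat) => PySem.List.pySetD out ((sidx : Int) + (j : Int)) ((pvStatNames feature).getD j "")) out) out0
  PySem.List.pySetD out (-1) "Y_LABEL"

-- ===== PORT B =====
def create_out_header_alt (id_to_feature : List (Int × String)) (is_categorical_feature : List (String × Bool)) (possible_values : List (String × List (String × Int))) : List String :=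
  let dId := PySem.Dict.mk id_to_feature
  let dCat := PySem.Dict.mk is_categorical_feature
  let dPv := PySem.Dict.mk possible_values
  let out := (List.range dId.size).foldl (fun out (i : Nat) =>
    let feature := dId.getD (i : Int) ""
    if dCat.getD feature false then
      let pvf := dPv.getD feature []
      let block := pvf.foldl
        (fun blk p => PySem.List.pySetD blk p.2 (pvFeatureName feature p.1))
        (List.replicate pvf.length "")
      out ++ block
    else
      out ++ pvStatNames feature) []
  out ++ ["Y_LABEL"]

-- ===== PRECONDITION & SPEC =====
-- Pre_ admits exactly the inputs on which A returns without a KeyError (every feature id 0..n-1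
-- present, each feature present in is_categorical_feature and, if categorical, in possible_values),
-- and additionally requires every categorical value index to lie in [0, len(possible_values[f])):
-- it excludes malformed index maps on which A's flat scatter-write spills or wraps into
-- neighbouring cells while still returning (see cites in claim.json).
def pvPreB (id_to_feature : List (Int × String)) (is_categorical_feature : List (String × Bool)) (possible_values : List (String × List (String × Int))) : Bool :=
  let dId := PySem.Dict.mk id_to_feature
  let dCat := PySem.Dict.mk is_categorical_feature
  let dPv := PySem.Dict.mk possible_values
  (List.range dId.size).all (fun i =>
    dId.contains (i : Int) &&
    dCat.contains (dId.getD (i : Int) "") &&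
    (!(dCat.getD (dId.getD (i : Int) "") false) ||
      (dPv.contains (dId.getD (i : Int) "") &&
       (dPv.getD (dId.getD (i : Int) "") []).all (fun p =>
          decide (0 ≤ p.2 ∧ p.2 < ((dPv.getD (dId.getD (i : Int) "") []).length : Int))))))

def Pre_create_out_header (id_to_feature : List (Int × String)) (is_categorical_feature : List (String × Bool)) (possible_values : List (String × List (String × Int))) : Prop :=
  pvPreB id_to_feature is_categorical_feature possible_values = true

instance (id_to_feature : List (Int × String)) (is_categorical_feature : List (String × Bool)) (possible_values : List (String × List (String × Int))) : Decidable (Pre_create_out_header id_to_feature is_categorical_feature possible_values) := by unfold Pre_create_out_header; infer_instance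

def pvWitness_create_out_header : (List (Int × String)) × (List (String × Bool)) × (List (String × List (String × Int))) :=
  ([(0, "f"), (1, "g,h")], [("f", true), ("g,h", false)], [("f", [("a", 1), ("b,c", 0)])])

def Spec_create_out_header (id_to_feature : List (Int × String)) (is_categorical_feature : List (String × Bool)) (possible_values : List (String × List (String × Int))) (out : List String) : Prop := out = create_out_header_alt id_to_feature is_categorical_feature possible_values
instance (id_to_feature : List (Int × String)) (is_categorical_feature : List (String × Bool)) (possible_values : List (String × List (String × Int))) (out : List String) : Decidable (Spec_create_out_header id_to_feature is_categorical_feature possible_values out) := by unfold Spec_create_out_header; infer_instance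

-- ===== CLAIM (what is proved, stated in full; the proofs are below) =====
def Claim_equal_create_out_header : Prop := ∀ (id_to_feature : List (Int × String)) (is_categorical_feature : List (String × Bool)) (possible_values : List (String × List (String × Int))), Dom_create_out_header id_to_feature is_categorical_feature possible_values → Pre_create_out_header id_to_feature is_categorical_feature possible_values → Spec_create_out_header id_to_feature is_categorical_feature possible_values (create_out_header id_to_feature is_categorical_feature possible_values)

-- ===== LEMMAS AND PROOFS =====

-- the block one feature contributes (B computes it directly; A's writes leave it behind)
def pvBlock (dCat : PySem.Dict String Bool) (dPv : PySem.Dict String (List (String × Int))) (f : String) : List String :=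
  if dCat.getD f false then
    (dPv.getD f []).foldl (fun blk p => PySem.List.pySetD blk p.2 (pvFeatureName f p.1))
      (List.replicate (dPv.getD f []).length "")
  else pvStatNames f

def pvSize (dCat : PySem.Dict String Bool) (dPv : PySem.Dict String (List (String × Int))) (f : String) : Nat :=
  if dCat.getD f false then (dPv.getD f []).length else 4


-- proof-side abbreviations
def pvFeat (dId : PySem.Dict Int String) (j : Nat) : String := dId.getD (j : Int) ""

def pvFlat (dId : PySem.Dict Int String) (dCat : PySem.Dict String Bool)
    (dPv : PySem.Dict String (List (String × Int))) (k : Nat) : List String :=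
  (List.range k).flatMap (fun j => pvBlock dCat dPv (pvFeat dId j))

-- prefix sums of block sizes
def pvS (fs : Nat → Nat) : Nat → Nat
  | 0 => 0
  | k + 1 => pvS fs k + fs k

lemma pvS_mono (fs : Nat → Nat) {a b : Nat} (h : a ≤ b) : pvS fs a ≤ pvS fs b := by
  induction b with
  | zero =>
      have : a = 0 := Nat.le_zero.mp h
      simp [this]
  | succ b ih =>
      rcases Nat.lt_or_ge a (b + 1) with hlt | hge
      · exact le_trans (ih (Nat.lt_succ_iff.mp hlt)) (by simp [pvS])
      · have : a = b + 1 := le_antisymm h hge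
        simp [this]

lemma length_foldl_pySetD {β : Type} (g : β → Int) (h : β → String) :
    ∀ (l : List β) (blk : List String),
      (l.foldl (fun b p => PySem.List.pySetD b (g p) (h p)) blk).length = blk.length := by
  intro l
  induction l with
  | nil => intro blk; rfl
  | cons p l ih =>
      intro blk
      simp only [List.foldl_cons, ih, PySem.List.length_pySetD]

lemma length_pvBlock (dCat : PySem.Dict String Bool) (dPv : PySem.Dict String (List (String × Int))) (f : String) :
    (pvBlock dCat dPv f).length = pvSize dCat dPv f := by
  unfold pvBlock pvSize
  split
  · rw [length_foldl_pySetD]; simp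
  · rfl

lemma length_pvFlat (dId : PySem.Dict Int String) (dCat : PySem.Dict String Bool)
    (dPv : PySem.Dict String (List (String × Int))) (k : Nat) :
    (pvFlat dId dCat dPv k).length = pvS (fun j => pvSize dCat dPv (pvFeat dId j)) k := by
  induction k with
  | zero => rfl
  | succ k ih =>
      simp only [pvFlat, List.range_succ, List.flatMap_append, List.flatMap_cons,
        List.flatMap_nil, List.append_nil, List.length_append] at *
      rw [ih, length_pvBlock]
      rfl

lemma pvFlat_succ (dId : PySem.Dict Int String) (dCat : PySem.Dict String Bool)
    (dPv : PySem.Dict String (List (String × Int))) (k : Nat) :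
    pvFlat dId dCat dPv (k + 1) = pvFlat dId dCat dPv k ++ pvBlock dCat dPv (pvFeat dId k) := by
  simp [pvFlat, List.range_succ]

lemma pySetD_middle (pre blk rest : List String) (i : Int) (v : String)
    (h0 : 0 ≤ i) (h1 : i < (blk.length : Int)) :
    PySem.List.pySetD (pre ++ (blk ++ rest)) ((pre.length : Int) + i) v
      = pre ++ (PySem.List.pySetD blk i v ++ rest) := by
  rw [PySem.List.pySetD_of_nonneg _ _ (by omega), PySem.List.pySetD_of_nonneg _ _ h0]
  have ht : ((pre.length : Int) + i).toNat = pre.length + i.toNat := by omega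
  rw [ht]
  rw [List.set_append_right _ _ (by omega)]
  rw [Nat.add_sub_cancel_left]
  rw [List.set_append_left _ _ (by omega)]

lemma scatter_shift {β : Type} (g : β → Int) (h : β → String) (l : List β) :
    ∀ (pre blk rest : List String), (∀ p ∈ l, 0 ≤ g p ∧ g p < (blk.length : Int)) →
      l.foldl (fun out p => PySem.List.pySetD out ((pre.length : Int) + g p) (h p)) (pre ++ (blk ++ rest))
        = pre ++ (l.foldl (fun b p => PySem.List.pySetD b (g p) (h p)) blk ++ rest) := by
  induction l with
  | nil => intro pre blk rest _; rfl
  | cons p l ih =>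
      intro pre blk rest hb
      have hp := hb p (by simp)
      simp only [List.foldl_cons]
      rw [pySetD_middle pre blk rest (g p) (h p) hp.1 hp.2]
      exact ih pre _ rest (by
        intro q hq
        have := hb q (List.mem_cons_of_mem _ hq)
        simpa [PySem.List.length_pySetD] using this)

-- A's helper fold, named for the induction
def pvHelpStep (dId : PySem.Dict Int String) (dCat : PySem.Dict String Bool)
    (dPv : PySem.Dict String (List (String × Int))) :
    (Nat × List Nat × List Nat) → Nat → (Nat × List Nat × List Nat) := fun st i =>
  let feature := dId.getD (i : Int) ""
  let bp := st.2.1.set i st.1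
  let e := if dCat.getD feature false then st.1 + (dPv.getD feature []).length
           else st.1 + 4
  let ep := st.2.2.set i e
  (e, bp, ep)

def pvHelpFold (dId : PySem.Dict Int String) (dCat : PySem.Dict String Bool)
    (dPv : PySem.Dict String (List (String × Int))) (k : Nat) : Nat × List Nat × List Nat :=
  (List.range k).foldl (pvHelpStep dId dCat dPv)
    (0, List.replicate dId.size 0, List.replicate dId.size 0)

lemma computeHelper_eq (dId : PySem.Dict Int String) (dCat : PySem.Dict String Bool)
    (dPv : PySem.Dict String (List (String × Int))) :
    pvComputeHelper dId dCat dPv 4 = pvHelpFold dId dCat dPv dId.size := rfl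

lemma helpFold_spec (dId : PySem.Dict Int String) (dCat : PySem.Dict String Bool)
    (dPv : PySem.Dict String (List (String × Int))) :
    ∀ k, k ≤ dId.size →
      (pvHelpFold dId dCat dPv k).1 = pvS (fun j => pvSize dCat dPv (pvFeat dId j)) k
      ∧ (pvHelpFold dId dCat dPv k).2.1.length = dId.size
      ∧ ∀ i, i < dId.size →
        (pvHelpFold dId dCat dPv k).2.1.getD i 0
          = if i < k then pvS (fun j => pvSize dCat dPv (pvFeat dId j)) i else 0 := by
  intro k
  induction k with
  | zero =>
      intro _
      refine ⟨rfl, by simp [pvHelpFold], ?_⟩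
      intro i hi
      simp [pvHelpFold, List.getD_eq_getElem?_getD, hi]
  | succ k ih =>
      intro hk
      obtain ⟨h1, hlen, h2⟩ := ih (by omega)
      have hstep : pvHelpFold dId dCat dPv (k + 1)
          = pvHelpStep dId dCat dPv (pvHelpFold dId dCat dPv k) k := by
        simp [pvHelpFold, List.range_succ]
      refine ⟨?_, ?_, ?_⟩
      · rw [hstep]
        simp only [pvHelpStep, h1]
        split <;> simp [pvS, pvSize, pvFeat, *]
      · rw [hstep]; simpa [pvHelpStep] using hlen
      · intro i hi
        rw [hstep]
        simp only [pvHelpStep]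
        rcases Nat.lt_trichotomy i k with hik | hik | hik
        · rw [List.getD_eq_getElem?_getD, List.getElem?_set_ne (by omega),
            ← List.getD_eq_getElem?_getD, h2 i hi]
          simp [hik, Nat.lt_succ_of_lt hik]
        · subst hik
          rw [List.getD_eq_getElem?_getD, List.getElem?_set_self (by omega)]
          simp [h1]
        · rw [List.getD_eq_getElem?_getD, List.getElem?_set_ne (by omega),
            ← List.getD_eq_getElem?_getD, h2 i hi]
          have : ¬ i < k := by omega
          have : ¬ i < k + 1 := by omega
          simp [*]

lemma pySetD_neg_one_append_singleton (ys : List String) (a v : String) :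
    PySem.List.pySetD (ys ++ [a]) (-1) v = ys ++ [v] := by
  simp [PySem.List.pySetD, PySem.List.pySet?, PySem.List.pyIdx?]

theorem create_out_header_spec : Claim_equal_create_out_header := by
  intro id_to_feature is_categorical_feature possible_values _ hpre
  unfold Pre_create_out_header pvPreB at hpre
  rw [List.all_eq_true] at hpre
  unfold Spec_create_out_header create_out_header create_out_header_alt
  dsimp only
  set dId := PySem.Dict.mk id_to_feature with hdId
  set dCat := PySem.Dict.mk is_categorical_feature with hdCat
  set dPv := PySem.Dict.mk possible_values with hdPv
  -- facts from the precondition: bounds on every categorical index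
  have hbound : ∀ i, i < dId.size → dCat.getD (pvFeat dId i) false = true →
      ∀ p ∈ dPv.getD (pvFeat dId i) [], 0 ≤ p.2 ∧ p.2 < ((dPv.getD (pvFeat dId i) []).length : Int) := by
    intro i hi hc p hp
    have hP := hpre i (List.mem_range.mpr hi)
    unfold pvFeat at hc hp
    simp only [Bool.and_eq_true, Bool.or_eq_true, Bool.not_eq_true', hc, Bool.true_eq_false, false_or, List.all_eq_true, decide_eq_true_eq] at hP
    exact hP.2.2 p hp
  -- sizes and prefix sums
  set fs : Nat → Nat := fun j => pvSize dCat dPv (pvFeat dId j) with hfs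
  set L : Nat := pvS fs dId.size with hL
  -- the helper's outputs
  have hhelp := helpFold_spec dId dCat dPv dId.size (le_refl _)
  rw [computeHelper_eq]
  set bp := (pvHelpFold dId dCat dPv dId.size).2.1 with hbp
  -- B's side: the fold appends exactly the blocks
  have hB : (List.range dId.size).foldl
      (fun (out : List String) (i : Nat) =>
        if dCat.getD (dId.getD (i : Int) "") false = true then
          out ++ (dPv.getD (dId.getD (i : Int) "") []).foldl
            (fun blk p => PySem.List.pySetD blk p.2 (pvFeatureName (dId.getD (i : Int) "") p.1))
            (List.replicate (dPv.getD (dId.getD (i : Int) "") []).length "")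
        else
          out ++ pvStatNames (dId.getD (i : Int) "")) []
      = pvFlat dId dCat dPv dId.size := by
    have hstep : (fun (out : List String) (i : Nat) =>
        if dCat.getD (dId.getD (i : Int) "") false = true then
          out ++ (dPv.getD (dId.getD (i : Int) "") []).foldl
            (fun blk p => PySem.List.pySetD blk p.2 (pvFeatureName (dId.getD (i : Int) "") p.1))
            (List.replicate (dPv.getD (dId.getD (i : Int) "") []).length "")
        else
          out ++ pvStatNames (dId.getD (i : Int) ""))
        = (fun out i => out ++ pvBlock dCat dPv (pvFeat dId i)) := by
      funext out i
      simp only [pvBlock, pvFeat]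
      split <;> rfl
    rw [hstep, PySem.List.foldl_append_eq_flatMap]
    rfl
  -- A's side: the scatter loop fills the preallocated array with the same blocks
  have hA : ∀ k, k ≤ dId.size →
      (List.range k).foldl (fun (out : List String) (i : Nat) =>
        if dCat.getD (dId.getD (i : Int) "") false = true then
          (dPv.getD (dId.getD (i : Int) "") []).foldl
            (fun out p => PySem.List.pySetD out (((bp.getD i 0 : Nat) : Int) + p.2)
              (pvFeatureName (dId.getD (i : Int) "") p.1)) out
        else
          (List.range 4).foldl
            (fun out (j : Nat) => PySem.List.pySetD out (((bp.getD i 0 : Nat) : Int) + (j : Int))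
              ((pvStatNames (dId.getD (i : Int) "")).getD j "")) out)
        (List.replicate (L + 1) "")
      = pvFlat dId dCat dPv k ++ List.replicate (L + 1 - pvS fs k) "" := by
    intro k
    induction k with
    | zero => intro _; simp [pvFlat, pvS]
    | succ k ih =>
        intro hk
        rw [show List.range (k+1) = List.range k ++ [k] from List.range_succ,
          List.foldl_append, ih (by omega), List.foldl_cons, List.foldl_nil]
        have hSk1 : pvS fs (k + 1) ≤ L := hL ▸ pvS_mono fs hk
        have hSk : pvS fs k + fs k = pvS fs (k + 1) := rfl
        have hsidx : bp.getD k 0 = pvS fs k := by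
          rw [hbp, hhelp.2.2 k (by omega), if_pos (Nat.lt_of_succ_le hk), hfs]
        have hprelen : (pvFlat dId dCat dPv k).length = pvS fs k := length_pvFlat ..
        have hsplit : List.replicate (L + 1 - pvS fs k) ""
            = List.replicate (fs k) "" ++ List.replicate (L + 1 - pvS fs (k + 1)) ("" : String) := by
          rw [← List.replicate_add]
          congr 1
          omega
        rw [hsidx, hsplit]
        by_cases hc : dCat.getD (dId.getD (k : Int) "") false = true
        · -- categorical feature
          rw [if_pos hc]
          have hfsk : fs k = (dPv.getD (dId.getD (k : Int) "") []).length := by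
            simp [hfs, pvSize, pvFeat, hc]
          rw [hfsk, ← hprelen]
          rw [scatter_shift (fun p => p.2) (fun p => pvFeatureName (dId.getD (k : Int) "") p.1)
            (dPv.getD (dId.getD (k : Int) "") []) (pvFlat dId dCat dPv k)
            (List.replicate (dPv.getD (dId.getD (k : Int) "") []).length "")
            (List.replicate (L + 1 - pvS fs (k + 1)) "")
            (by
              intro p hp
              have := hbound k (by omega) (by simpa [pvFeat] using hc) p (by simpa [pvFeat] using hp)
              simpa using this)]
          rw [pvFlat_succ, List.append_assoc]
          congr 2
          simp [pvBlock, pvFeat, hc]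
        · -- non-categorical feature
          rw [if_neg hc]
          have hfs4 : fs k = 4 := by
            simp [hfs, pvSize, pvFeat, hc]
          rw [hfs4, ← hprelen]
          rw [scatter_shift (fun (j : Nat) => (j : Int))
            (fun j => (pvStatNames (dId.getD (k : Int) "")).getD j "") (List.range 4)
            (pvFlat dId dCat dPv k) (List.replicate 4 "")
            (List.replicate (L + 1 - pvS fs (k + 1)) "")
            (by
              intro j hj
              have := List.mem_range.mp hj
              simp only [List.length_replicate]
              omega)]
          rw [pvFlat_succ, List.append_assoc]
          congr 2
          have hfold4 : (List.range 4).foldl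
              (fun b (j : Nat) => PySem.List.pySetD b ((j : Int)) ((pvStatNames (dId.getD (k : Int) "")).getD j ""))
              (List.replicate 4 "") = pvStatNames (dId.getD (k : Int) "") := rfl
          rw [hfold4]
          simp [pvBlock, pvFeat, hc]
  rw [(hhelp.1 : (pvHelpFold dId dCat dPv dId.size).1 = L)]
  rw [hA dId.size (le_refl _), hB]
  have hone : L + 1 - pvS fs dId.size = 1 := by omega
  rw [hone]
  exact pySetD_neg_one_append_singleton _ _ _
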